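-- pv_equiv track=rewrite | github.com/Vasjaaa23/Python | orbite_ocena.py | lune
-- ===== SOURCE A (Python) =====
-- def lune(orbite):
--     slovar = {}
--     for luna, planet in orbite.items():
--         if planet in slovar:
--             slovar[planet].add(luna)
--         else:
--             slovar[planet] = {luna}
--     return slovar
-- ===== SOURCE B (Python) =====
-- def lune(orbite):
--     planets = set(orbite.values())
--     return {p: {luna for luna, q in orbite.items() if q == p} for p in planets}
-- ===== Notes on version B (the rewrite author's own statement) =====
-- stated objective: alternative
-- what changed: Replaces the single accumulating dict-building pass with a two-level comprehension: first the distinct planets via set(orbite.values()), then for each planet a set comprehension re-scanning all items.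
import Mathlib
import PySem

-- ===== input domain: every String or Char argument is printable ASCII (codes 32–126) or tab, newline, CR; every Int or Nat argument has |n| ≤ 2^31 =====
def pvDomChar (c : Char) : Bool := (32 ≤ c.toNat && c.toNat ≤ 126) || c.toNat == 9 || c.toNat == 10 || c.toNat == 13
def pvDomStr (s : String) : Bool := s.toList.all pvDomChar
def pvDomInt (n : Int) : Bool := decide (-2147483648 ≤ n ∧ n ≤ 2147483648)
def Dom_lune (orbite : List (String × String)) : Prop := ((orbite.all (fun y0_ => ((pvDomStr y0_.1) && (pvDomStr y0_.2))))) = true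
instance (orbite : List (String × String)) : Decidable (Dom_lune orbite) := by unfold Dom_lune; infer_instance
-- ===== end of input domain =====

-- B replaces A's single accumulating pass with a distinct-planet outer pass and an inner re-scan (alternative decomposition, not faster).

-- ===== PORT A =====
-- loop body of A: for luna, planet in orbite.items(): if planet in slovar: slovar[planet].add(luna) else: slovar[planet] = {luna}
def luneStep (slovar : PySem.Dict String (PySem.Set String)) (lp : String × String) :
    PySem.Dict String (PySem.Set String) :=
  if slovar.contains lp.2 then
    slovar.modify lp.2 PySem.Set.empty (fun s => PySem.Set.add s lp.1)
  else
    slovar.insert lp.2 (PySem.Set.ofList [lp.1])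

def lune (orbite : List (String × String)) : List (String × List String) :=
  (orbite.foldl luneStep PySem.Dict.empty).items

-- ===== PORT B =====
-- {luna for luna, q in orbite.items() if q == p}
def lunePlanetGroup (orbite : List (String × String)) (p : String) : String × List String :=
  (p, PySem.Set.ofList ((orbite.filter (fun lp => lp.2 == p)).map Prod.fst))

def lune_alt (orbite : List (String × String)) : List (String × List String) :=
  (PySem.Set.ofList (orbite.map Prod.snd)).map (lunePlanetGroup orbite)

-- ===== PRECONDITION & SPEC =====
def Spec_lune (orbite : List (String × String)) (out : List (String × List String)) : Prop := out = lune_alt orbite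
instance (orbite : List (String × String)) (out : List (String × List String)) : Decidable (Spec_lune orbite out) := by unfold Spec_lune; infer_instance

-- ===== CLAIM (what is proved, stated in full; the proofs are below) =====
def Claim_equal_lune : Prop := ∀ (orbite : List (String × String)), Dom_lune orbite → Spec_lune orbite (lune orbite)

-- ===== LEMMAS AND PROOFS =====

theorem lune_eq_alt (orbite : List (String × String)) : lune orbite = lune_alt orbite := by
  induction orbite using List.reverseRecOn with
  | nil => rfl
  | append_singleton xs x ih =>
    obtain ⟨l, p⟩ := x
    set d : PySem.Dict String (PySem.Set String) := xs.foldl luneStep PySem.Dict.empty with hd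
    have hitems : d.items = lune_alt xs := ih
    have hkeys : d.keys = PySem.Set.ofList (xs.map Prod.snd) := by
      show d.items.map Prod.fst = _
      rw [hitems]
      simp [lune_alt, lunePlanetGroup, List.map_map, Function.comp_def]
    have hnd : d.keys.Nodup := by rw [hkeys]; exact PySem.Set.nodup_ofList _
    have hlhs : lune (xs ++ [(l, p)]) = (luneStep d (l, p)).items := by
      simp [lune, List.foldl_append, hd]
    have hplanets : PySem.Set.ofList ((xs ++ [(l, p)]).map Prod.snd)
        = PySem.Set.add (PySem.Set.ofList (xs.map Prod.snd)) p := by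
      rw [List.map_append]
      simp only [List.map_cons, List.map_nil]
      rw [PySem.Set.ofList_append_singleton]
    by_cases hp : p ∈ xs.map Prod.snd
    · -- planet already present
      have hmem : p ∈ PySem.Set.ofList (xs.map Prod.snd) := (PySem.Set.mem_ofList _ _).mpr hp
      have hc : d.contains p = true := by
        rw [PySem.Dict.contains_eq_decide_mem_keys, hkeys]; simpa using hmem
      have hin : (p, PySem.Set.ofList ((xs.filter (fun lp => lp.2 == p)).map Prod.fst)) ∈ d.items := by
        rw [hitems]
        exact List.mem_map.mpr ⟨p, hmem, rfl⟩
      have hgd := PySem.Dict.getD_of_mem_items d hin hnd (PySem.Set.empty : PySem.Set String)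
      have hstep : luneStep d (l, p)
          = d.insert p (PySem.Set.add (PySem.Set.ofList ((xs.filter (fun lp => lp.2 == p)).map Prod.fst)) l) := by
        simp only [luneStep, hc, if_true, PySem.Dict.modify, hgd]
      rw [hlhs, hstep, PySem.Dict.items_insert_of_contains _ _ hc, hitems]
      show _ = lune_alt (xs ++ [(l, p)])
      unfold lune_alt
      rw [hplanets, PySem.Set.add_of_mem hmem, List.map_map]
      apply List.map_congr_left
      intro p' hp'
      simp only [Function.comp_def, lunePlanetGroup]
      by_cases hpp : p' = p
      · subst hpp
        rw [if_pos (by simp)]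
        rw [List.filter_append]
        simp only [List.filter_cons, List.filter_nil]
        rw [if_pos (by simp)]
        rw [List.map_append]
        simp only [List.map_cons, List.map_nil]
        rw [PySem.Set.ofList_append_singleton]
      · rw [if_neg (by simpa using hpp)]
        rw [List.filter_append]
        simp only [List.filter_cons, List.filter_nil]
        rw [if_neg (by simpa using Ne.symm hpp)]
        simp
    · -- new planet
      have hnmem : p ∉ PySem.Set.ofList (xs.map Prod.snd) := by
        rw [PySem.Set.mem_ofList]; exact hp
      have hc : d.contains p = false := by
        rw [PySem.Dict.contains_eq_decide_mem_keys, hkeys]; simpa using hnmem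
      have hstep : luneStep d (l, p) = d.insert p (PySem.Set.ofList [l]) := by
        simp [luneStep, hc]
      have hfilt : xs.filter (fun lp => lp.2 == p) = [] := by
        rw [List.filter_eq_nil_iff]
        intro a ha
        simp only [beq_iff_eq]
        intro h
        exact hp (h ▸ List.mem_map_of_mem ha)
      rw [hlhs, hstep, PySem.Dict.items_insert_of_not_contains _ _ hc, hitems]
      show _ = lune_alt (xs ++ [(l, p)])
      unfold lune_alt
      rw [hplanets, PySem.Set.add_of_not_mem hnmem, List.map_append]
      congr 1
      · apply List.map_congr_left
        intro p' hp'
        have hpp : p' ≠ p := fun h => hnmem (h ▸ hp')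
        simp only [lunePlanetGroup]
        rw [List.filter_append]
        simp only [List.filter_cons, List.filter_nil]
        rw [if_neg (by simpa using Ne.symm hpp)]
        simp
      · simp only [List.map_cons, List.map_nil, lunePlanetGroup]
        rw [List.filter_append, hfilt]
        simp

-- ===== VERDICT (by name: the statement is the Claim_ definition above) =====
theorem lune_spec : Claim_equal_lune := by
  intro orbite _
  exact lune_eq_alt orbite
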